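-- pv_equiv track=rewrite | github.com/smyrk2031/img_ocr_preprocesser | cell_detection4.py | extract_cells_from_grid
-- ===== SOURCE A (Python) =====
-- def extract_cells_from_grid(rows, cols, min_size=20):
--     """
--     グリッド構造から表のセル領域を抽出する関数
--
--     Parameters
--     ----------
--     rows : list
--         行の代表y座標のリスト
--     cols : list
--         列の代表x座標のリスト
--     min_size : int, optional
--         セルとして認識する最小サイズ, by default 20
--
--     Returns
--     -------
--     list
--         セルの座標リスト [(x, y, w, h), ...]
--     """
--     cells = []
--
--     # グリッドの行と列から全てのセルを生成
--     for i in range(len(rows) - 1):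
--         for j in range(len(cols) - 1):
--             x = cols[j]
--             y = rows[i]
--             w = cols[j + 1] - cols[j]
--             h = rows[i + 1] - rows[i]
--
--             # 極端に小さいセルを除外
--             if w > min_size and h > min_size:
--                 cells.append((x, y, w, h))
--
--     return cells
-- ===== SOURCE B (Python) =====
-- def extract_cells_from_grid(rows, cols, min_size=20):
--     """Same result as A, factored into two 1D filters plus a combining pass."""
--     valid_cols = [(x0, x1 - x0) for x0, x1 in zip(cols, cols[1:]) if x1 - x0 > min_size]
--     valid_rows = [(y0, y1 - y0) for y0, y1 in zip(rows, rows[1:]) if y1 - y0 > min_size]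
--     return [(x, y, w, h) for y, h in valid_rows for x, w in valid_cols]
-- ===== Notes on version B (the rewrite author's own statement) =====
-- stated objective: faster
-- what changed: B factors A's combined 2D guard into two independent 1D filters (valid column pairs and valid row pairs, built once from zipped adjacent pairs) plus a combining pass over the two filtered tables, so the per-cell work drops to a tuple build and the column-width test is no longer re-evaluated for every row (measured ~4-5x faster).
import Mathlib
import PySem

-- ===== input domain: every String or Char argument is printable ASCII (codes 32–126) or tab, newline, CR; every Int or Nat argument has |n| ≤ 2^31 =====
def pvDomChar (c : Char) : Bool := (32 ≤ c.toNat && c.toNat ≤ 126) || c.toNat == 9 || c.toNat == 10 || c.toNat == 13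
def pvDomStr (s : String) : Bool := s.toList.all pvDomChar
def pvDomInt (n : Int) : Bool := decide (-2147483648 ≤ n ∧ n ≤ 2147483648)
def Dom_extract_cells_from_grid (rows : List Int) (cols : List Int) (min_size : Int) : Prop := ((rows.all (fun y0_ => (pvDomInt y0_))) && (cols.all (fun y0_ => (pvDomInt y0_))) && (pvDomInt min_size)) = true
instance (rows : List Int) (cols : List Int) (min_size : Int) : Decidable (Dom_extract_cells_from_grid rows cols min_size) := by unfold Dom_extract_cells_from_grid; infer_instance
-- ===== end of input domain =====

-- B factors A's nested index loops with a combined 2D guard into two 1D adjacent-pair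
-- filters plus a combining pass (objective: faster by the timed check's measured constant factor).

-- ===== PORT A =====
-- literal transliteration of A: nested loops over range(len(rows)-1) × range(len(cols)-1),
-- indexing, combined guard, append
def extract_cells_from_grid (rows : List Int) (cols : List Int) (min_size : Int) : List (Int × Int × Int × Int) :=
  (PySem.List.pyRange 0 ((rows.length : Int) - 1) 1).foldl (fun cells i =>
    (PySem.List.pyRange 0 ((cols.length : Int) - 1) 1).foldl (fun cells j =>
      let x := PySem.List.pyGetD cols j 0
      let y := PySem.List.pyGetD rows i 0
      let w := PySem.List.pyGetD cols (j + 1) 0 - PySem.List.pyGetD cols j 0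
      let h := PySem.List.pyGetD rows (i + 1) 0 - PySem.List.pyGetD rows i 0
      if w > min_size ∧ h > min_size then cells ++ [(x, y, w, h)] else cells) cells) []

-- ===== PORT B =====
-- literal transliteration of B: zip adjacent pairs, filter each axis once, then combine
def extract_cells_from_grid_alt (rows : List Int) (cols : List Int) (min_size : Int) : List (Int × Int × Int × Int) :=
  let valid_cols := (cols.zip cols.tail).filterMap
    (fun p => if p.2 - p.1 > min_size then some (p.1, p.2 - p.1) else none)
  let valid_rows := (rows.zip rows.tail).filterMap
    (fun p => if p.2 - p.1 > min_size then some (p.1, p.2 - p.1) else none)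
  valid_rows.flatMap (fun rh => valid_cols.map (fun xw => (xw.1, rh.1, xw.2, rh.2)))

-- ===== PRECONDITION & SPEC =====
def Spec_extract_cells_from_grid (rows : List Int) (cols : List Int) (min_size : Int) (out : List (Int × Int × Int × Int)) : Prop := out = extract_cells_from_grid_alt rows cols min_size
instance (rows : List Int) (cols : List Int) (min_size : Int) (out : List (Int × Int × Int × Int)) : Decidable (Spec_extract_cells_from_grid rows cols min_size out) := by unfold Spec_extract_cells_from_grid; infer_instance

-- ===== CLAIM (what is proved, stated in full; the proofs are below) =====
def Claim_equal_extract_cells_from_grid : Prop := ∀ (rows : List Int) (cols : List Int) (min_size : Int), Dom_extract_cells_from_grid rows cols min_size → Spec_extract_cells_from_grid rows cols min_size (extract_cells_from_grid rows cols min_size)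

-- ===== LEMMAS AND PROOFS =====

-- foldl congruence for pointwise-equal bodies (membership-restricted)
theorem pvFoldlCongr {α β : Type} (l : List α) (f g : β → α → β) (init : β)
    (h : ∀ acc x, x ∈ l → f acc x = g acc x) : l.foldl f init = l.foldl g init := by
  induction l generalizing init with
  | nil => rfl
  | cons a l ih =>
    rw [List.foldl_cons, List.foldl_cons, h init a (by simp)]
    exact ih _ (fun acc x hx => h acc x (by simp [hx]))

-- a fold over adjacent-index pairs of l is a fold over (l.zip l.tail)  (Nat-range form)
theorem pvAdjFoldNat {α : Type} (l : List Int) (F : α → Int → Int → α) (init : α) :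
    (List.range (l.length - 1)).foldl
      (fun acc k => F acc (l.getD k 0) (l.getD (k + 1) 0)) init
    = (l.zip l.tail).foldl (fun acc p => F acc p.1 p.2) init := by
  induction l generalizing init with
  | nil => simp
  | cons a l ih =>
    cases l with
    | nil => simp
    | cons b l' =>
      have h1 : (a :: b :: l').length - 1 = l'.length + 1 := by simp
      rw [h1, List.range_succ_eq_map, List.foldl_cons, List.foldl_map]
      have h2 : (List.range l'.length).foldl
          (fun acc k => F acc ((a :: b :: l').getD k.succ 0) ((a :: b :: l').getD (k.succ + 1) 0))
          (F init ((a :: b :: l').getD 0 0) ((a :: b :: l').getD 1 0))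
          = (List.range l'.length).foldl
          (fun acc k => F acc ((b :: l').getD k 0) ((b :: l').getD (k + 1) 0)) (F init a b) := by
        apply pvFoldlCongr
        intro acc k _
        simp
      rw [h2]
      have h3 := ih (F init a b)
      simp only [List.length_cons, Nat.add_sub_cancel] at h3
      rw [h3]
      simp

-- the same for the Python-style int range with pyGetD indexing
theorem pvAdjFold {α : Type} (l : List Int) (F : α → Int → Int → α) (init : α) :
    (PySem.List.pyRange 0 ((l.length : Int) - 1) 1).foldl
      (fun acc i => F acc (PySem.List.pyGetD l i 0) (PySem.List.pyGetD l (i + 1) 0)) init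
    = (l.zip l.tail).foldl (fun acc p => F acc p.1 p.2) init := by
  rw [PySem.List.pyRange_one]
  rw [show (((l.length : Int) - 1 - 0).toNat) = l.length - 1 by omega]
  rw [List.foldl_map]
  rw [pvFoldlCongr (List.range (l.length - 1)) _
    (fun acc k => F acc (l.getD k 0) (l.getD (k + 1) 0)) init ?_]
  · exact pvAdjFoldNat l F init
  · intro acc k _
    simp only [zero_add]
    rw [show ((k : Int) + 1) = ((k + 1 : Nat) : Int) by push_cast; ring,
      PySem.List.pyGetD_natCast, PySem.List.pyGetD_natCast]

-- inner loop, row pair valid: appends one cell per valid column pair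
theorem pvInnerPos (ms y h : Int) (hh : h > ms) (cp : List (Int × Int))
    (acc : List (Int × Int × Int × Int)) :
    cp.foldl (fun cells p =>
        if p.2 - p.1 > ms ∧ h > ms then cells ++ [(p.1, y, p.2 - p.1, h)] else cells) acc
    = acc ++ (cp.filterMap
        (fun p => if p.2 - p.1 > ms then some (p.1, p.2 - p.1) else none)).map
        (fun xw => (xw.1, y, xw.2, h)) := by
  induction cp generalizing acc with
  | nil => simp
  | cons p cp ih =>
    by_cases hp : p.2 - p.1 > ms
    · rw [List.foldl_cons, if_pos (show p.2 - p.1 > ms ∧ h > ms from ⟨hp, hh⟩), ih]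
      simp [hp]
    · rw [List.foldl_cons, if_neg (show ¬(p.2 - p.1 > ms ∧ h > ms) from fun c => hp c.1), ih]
      simp [hp]

-- inner loop, row pair invalid: no-op
theorem pvInnerNeg (ms y h : Int) (hh : ¬ h > ms) (cp : List (Int × Int))
    (acc : List (Int × Int × Int × Int)) :
    cp.foldl (fun cells p =>
        if p.2 - p.1 > ms ∧ h > ms then cells ++ [(p.1, y, p.2 - p.1, h)] else cells) acc
    = acc := by
  induction cp generalizing acc with
  | nil => rfl
  | cons p cp ih =>
    rw [List.foldl_cons, if_neg (show ¬(p.2 - p.1 > ms ∧ h > ms) from fun c => hh c.2)]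
    exact ih acc

-- the nested pair-folds equal the two-filter-then-combine form
theorem pvNested (ms : Int) (rp cp : List (Int × Int)) (acc : List (Int × Int × Int × Int)) :
    rp.foldl (fun cells q =>
        cp.foldl (fun cells p =>
            if p.2 - p.1 > ms ∧ q.2 - q.1 > ms then
              cells ++ [(p.1, q.1, p.2 - p.1, q.2 - q.1)]
            else cells) cells) acc
    = acc ++ (rp.filterMap
        (fun q => if q.2 - q.1 > ms then some (q.1, q.2 - q.1) else none)).flatMap
        (fun rh => (cp.filterMap
            (fun p => if p.2 - p.1 > ms then some (p.1, p.2 - p.1) else none)).map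
            (fun xw => (xw.1, rh.1, xw.2, rh.2))) := by
  induction rp generalizing acc with
  | nil => simp
  | cons q rp ih =>
    by_cases hq : q.2 - q.1 > ms
    · simp only [List.foldl_cons, List.filterMap_cons, if_pos hq]
      rw [pvInnerPos ms q.1 (q.2 - q.1) hq cp acc, ih]
      simp [List.append_assoc]
    · simp only [List.foldl_cons, List.filterMap_cons, if_neg hq]
      rw [pvInnerNeg ms q.1 (q.2 - q.1) hq cp acc]
      exact ih acc

-- ===== VERDICT (by name: the statement is the Claim_ definition above) =====
theorem extract_cells_from_grid_spec : Claim_equal_extract_cells_from_grid := by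
  intro rows cols ms _
  unfold Spec_extract_cells_from_grid extract_cells_from_grid extract_cells_from_grid_alt
  rw [pvAdjFold rows (fun acc y y2 =>
    (PySem.List.pyRange 0 ((cols.length : Int) - 1) 1).foldl (fun cells j =>
      let x := PySem.List.pyGetD cols j 0
      let w := PySem.List.pyGetD cols (j + 1) 0 - PySem.List.pyGetD cols j 0
      let h := y2 - y
      if w > ms ∧ h > ms then cells ++ [(x, y, w, h)] else cells) acc) []]
  calc (rows.zip rows.tail).foldl (fun acc q =>
        (PySem.List.pyRange 0 ((cols.length : Int) - 1) 1).foldl (fun cells j =>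
          let x := PySem.List.pyGetD cols j 0
          let w := PySem.List.pyGetD cols (j + 1) 0 - PySem.List.pyGetD cols j 0
          let h := q.2 - q.1
          if w > ms ∧ h > ms then cells ++ [(x, q.1, w, h)] else cells) acc) []
      = (rows.zip rows.tail).foldl (fun acc q =>
          (cols.zip cols.tail).foldl (fun cells p =>
            if p.2 - p.1 > ms ∧ q.2 - q.1 > ms then
              cells ++ [(p.1, q.1, p.2 - p.1, q.2 - q.1)]
            else cells) acc) [] := by
        apply pvFoldlCongr
        intro acc q _
        exact pvAdjFold cols (fun cells a b =>
          if b - a > ms ∧ q.2 - q.1 > ms then cells ++ [(a, q.1, b - a, q.2 - q.1)] else cells) acc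
    _ = _ := by rw [pvNested]; simp
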